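-- pv_equiv track=rewrite | github.com/naixsu/Advent-of-Code | 2024/day_21/part_1.py | get_sequence_combinations
-- ===== SOURCE A (Python) =====
-- def get_sequence_combinations(sequences: list[list[str]]) -> list[list[str]]:
--     def backtrack(index, path):
--         if index == len(sequences):
--             combinations.append(''.join(path))
--             return
--
--         for choice in sequences[index]:
--             path.append(choice)
--             backtrack(index + 1, path)
--             path.pop()
--
--     combinations = []
--     backtrack(0, [])
--
--     return combinations
-- ===== SOURCE B (Python) =====
-- def get_sequence_combinations(sequences: list[list[str]]) -> list[list[str]]:
--     result = ['']
--     for seq in sequences: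
--         result = [prefix + choice for prefix in result for choice in seq]
--     return result
-- ===== Notes on version B (the rewrite author's own statement) =====
-- stated objective: simpler
-- what changed: Replaced the recursive backtracking with a mutable path by an iterative fold that extends a list of prefix strings with each sequence in turn.
import Mathlib
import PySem

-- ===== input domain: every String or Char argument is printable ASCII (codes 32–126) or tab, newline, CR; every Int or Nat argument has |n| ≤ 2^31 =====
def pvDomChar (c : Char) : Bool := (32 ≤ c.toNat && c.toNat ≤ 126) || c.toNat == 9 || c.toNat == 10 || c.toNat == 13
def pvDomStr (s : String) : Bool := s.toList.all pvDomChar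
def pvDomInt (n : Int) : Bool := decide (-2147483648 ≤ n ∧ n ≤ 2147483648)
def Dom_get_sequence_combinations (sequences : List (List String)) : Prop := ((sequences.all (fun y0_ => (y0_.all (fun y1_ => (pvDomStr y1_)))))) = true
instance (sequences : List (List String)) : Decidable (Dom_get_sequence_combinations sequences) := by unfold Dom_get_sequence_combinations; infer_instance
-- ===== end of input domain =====

-- B replaces A's recursive backtracking (mutable path, append/pop) by an
-- iterative fold extending a list of prefix strings; same output, objective: simpler.

-- ===== PORT A =====
-- A's backtrack(index, path): recursion over the remaining sequences (index
-- becomes the structural position); path is the list of chosen strings,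
-- ''.join(path) is its left fold of concatenation; the for-loop over choices
-- appending each recursive call's results in order is flatMap.
def pvBacktrack : List (List String) → List String → List String
  | [], path => [path.foldl (· ++ ·) ""]
  | s :: rest, path => s.flatMap (fun choice => pvBacktrack rest (path ++ [choice]))

def get_sequence_combinations (sequences : List (List String)) : List String :=
  pvBacktrack sequences []

-- ===== PORT B =====
def get_sequence_combinations_alt (sequences : List (List String)) : List String :=
  sequences.foldl (fun result seq => result.flatMap (fun pre => seq.map (fun choice => pre ++ choice))) [""]

-- ===== PRECONDITION & SPEC =====
def Spec_get_sequence_combinations (sequences : List (List String)) (out : List String) : Prop := out = get_sequence_combinations_alt sequences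
instance (sequences : List (List String)) (out : List String) : Decidable (Spec_get_sequence_combinations sequences out) := by unfold Spec_get_sequence_combinations; infer_instance

-- ===== CLAIM (what is proved, stated in full; the proofs are below) =====
def Claim_equal_get_sequence_combinations : Prop := ∀ (sequences : List (List String)), Dom_get_sequence_combinations sequences → Spec_get_sequence_combinations sequences (get_sequence_combinations sequences)

-- ===== LEMMAS AND PROOFS =====

-- A string-accumulator version both sides reduce to.
def pvGoS : List (List String) → String → List String
  | [], p => [p]
  | s :: rest, p => s.flatMap (fun c => pvGoS rest (p ++ c))

lemma pvBacktrack_eq_goS (seqs : List (List String)) (path : List String) :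
    pvBacktrack seqs path = pvGoS seqs (path.foldl (· ++ ·) "") := by
  induction seqs generalizing path with
  | nil => simp [pvBacktrack, pvGoS]
  | cons s rest ih =>
      simp only [pvBacktrack, pvGoS]
      refine List.flatMap_congr ?_
      intro c _
      rw [ih, List.foldl_append]
      simp [List.foldl]

lemma pvFoldl_eq_goS (seqs : List (List String)) (xs : List String) :
    seqs.foldl (fun result seq => result.flatMap (fun p => seq.map (fun c => p ++ c))) xs
      = xs.flatMap (fun p => pvGoS seqs p) := by
  induction seqs generalizing xs with
  | nil => simp [pvGoS]
  | cons s rest ih =>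
      rw [List.foldl_cons, ih]
      simp only [pvGoS, List.flatMap_assoc]
      refine List.flatMap_congr ?_
      intro p _
      simp [List.flatMap_map]

-- ===== VERDICT (by name: the statement is the Claim_ definition above) =====
theorem get_sequence_combinations_spec : Claim_equal_get_sequence_combinations := by
  intro sequences _
  unfold Spec_get_sequence_combinations get_sequence_combinations get_sequence_combinations_alt
  rw [pvBacktrack_eq_goS, pvFoldl_eq_goS]
  simp [List.flatMap]
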